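-- pv_equiv track=rewrite | github.com/sometastycake/leetcode | strings/easy/longer-contiguous-segments-of-ones-than-zeros.py | getSizeOfSegment
-- ===== SOURCE A (Python) =====
-- def getSizeOfSegment(s: str, value: str) -> int:
--     result = 0
--     segment = ''
--     for letter in s:
--         if (not segment or segment[-1] == value) and letter == value:
--             segment += letter
--         else:
--             if len(segment) > result:
--                 result = len(segment)
--             if letter == value:
--                 segment = letter
--             else:
--                 segment = ''
--     if segment and len(segment) > result:
--         result = len(segment)
--     return result
-- ===== SOURCE B (Python) =====
-- def getSizeOfSegment(s: str, value: str) -> int: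
--     # Two-pointer run-jumping scan: find the start of each run of `value`,
--     # jump to its end, and keep the longest run length.
--     best = 0
--     i = 0
--     n = len(s)
--     while i < n:
--         if s[i] == value:
--             j = i + 1
--             while j < n and s[j] == value:
--                 j += 1
--             if j - i > best:
--                 best = j - i
--             i = j
--         else:
--             i += 1
--     return best
-- ===== Notes on version B (the rewrite author's own statement) =====
-- stated objective: alternative
-- what changed: Replaced A's single scan that builds and flushes an accumulator string `segment` (with per-step last-char checks and end-of-loop flush) by a two-pointer scan that jumps from run start to run end and compares each whole run length against the best.
import Mathlib
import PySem

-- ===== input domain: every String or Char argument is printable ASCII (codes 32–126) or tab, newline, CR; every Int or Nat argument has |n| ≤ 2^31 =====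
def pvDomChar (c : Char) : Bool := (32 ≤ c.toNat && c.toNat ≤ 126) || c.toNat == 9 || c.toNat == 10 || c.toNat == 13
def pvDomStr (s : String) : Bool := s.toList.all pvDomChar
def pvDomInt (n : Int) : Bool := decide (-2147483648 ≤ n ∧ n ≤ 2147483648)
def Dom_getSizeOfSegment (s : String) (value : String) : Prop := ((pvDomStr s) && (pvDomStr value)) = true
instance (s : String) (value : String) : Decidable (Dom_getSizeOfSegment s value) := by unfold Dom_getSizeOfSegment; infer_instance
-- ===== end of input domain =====

-- B replaces A's accumulator-string scan by a two-pointer run-jumping scan (alternative decomposition, same cost).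


-- ===== PORT A =====
-- one step of A's for-loop; state = (result, segment as List Char); `segment[-1] == value` is `[last] = value.toList`
def stepA (vl : List Char) (st : Int × List Char) (letter : Char) : Int × List Char :=
  if (st.2.isEmpty || decide ([st.2.getLastD 'a'] = vl)) && decide ([letter] = vl) then
    (st.1, st.2 ++ [letter])
  else
    let res := if (st.2.length : Int) > st.1 then (st.2.length : Int) else st.1
    (res, if [letter] = vl then [letter] else [])

-- the `if segment and len(segment) > result` epilogue after the loop
def finishA (st : Int × List Char) : Int :=
  if !st.2.isEmpty && decide ((st.2.length : Int) > st.1) then (st.2.length : Int) else st.1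

def getSizeOfSegment (s : String) (value : String) : Int :=
  finishA (s.toList.foldl (stepA value.toList) (0, []))

-- ===== PORT B =====
-- inner while: advance j over characters equal to value, counting; returns (count, rest)
def skipB (vl : List Char) : List Char → Nat → Nat × List Char
  | [], k => (k, [])
  | c :: rest, k => if [c] = vl then skipB vl rest (k + 1) else (k, c :: rest)

theorem skipB_len_le (vl : List Char) (l : List Char) (k : Nat) :
    (skipB vl l k).2.length ≤ l.length := by
  induction l generalizing k with
  | nil => simp [skipB]
  | cons c rest ih =>
    simp only [skipB]
    split
    · exact le_trans (ih _) (Nat.le_succ _)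
    · simp

-- outer while, on the suffix of the string starting at i
def loopB (vl : List Char) (best : Int) : List Char → Int
  | [] => best
  | c :: rest =>
    if [c] = vl then
      let pr := skipB vl rest 1
      loopB vl (if (pr.1 : Int) > best then (pr.1 : Int) else best) pr.2
    else loopB vl best rest
termination_by l => l.length
decreasing_by
  · exact Nat.lt_succ_of_le (skipB_len_le _ _ _)
  · simp

def getSizeOfSegment_alt (s : String) (value : String) : Int :=
  loopB value.toList 0 s.toList

-- ===== PRECONDITION & SPEC =====
def Spec_getSizeOfSegment (s : String) (value : String) (out : Int) : Prop := out = getSizeOfSegment_alt s value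
instance (s : String) (value : String) (out : Int) : Decidable (Spec_getSizeOfSegment s value out) := by unfold Spec_getSizeOfSegment; infer_instance

-- ===== CLAIM (what is proved, stated in full; the proofs are below) =====
def Claim_equal_getSizeOfSegment : Prop := ∀ (s : String) (value : String), Dom_getSizeOfSegment s value → Spec_getSizeOfSegment s value (getSizeOfSegment s value)

-- ===== LEMMAS AND PROOFS =====

-- common reference: max run length of characters equal (as 1-char strings) to `value`
def specGo (vl : List Char) (best cur : Nat) : List Char → Nat
  | [] => max best cur
  | c :: l => if [c] = vl then specGo vl best (cur + 1) l else specGo vl (max best cur) 0 l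

theorem specGo_takeDrop (vl : List Char) (l : List Char) (best cur : Nat) :
    specGo vl best cur l
      = specGo vl best (cur + (l.takeWhile (fun c => decide ([c] = vl))).length)
          (l.dropWhile (fun c => decide ([c] = vl))) := by
  induction l generalizing cur with
  | nil => simp [List.takeWhile, List.dropWhile]
  | cons c rest ih =>
    by_cases h : [c] = vl
    · simp [specGo, h, List.takeWhile, List.dropWhile, ih (cur + 1)]
      ring_nf
    · simp [specGo, h, List.takeWhile, List.dropWhile]

theorem skipB_eq (vl : List Char) (l : List Char) (k : Nat) :
    skipB vl l k = (k + (l.takeWhile (fun c => decide ([c] = vl))).length,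
                    l.dropWhile (fun c => decide ([c] = vl))) := by
  induction l generalizing k with
  | nil => simp [skipB, List.takeWhile, List.dropWhile]
  | cons c rest ih =>
    by_cases h : [c] = vl
    · simp [skipB, h, List.takeWhile, List.dropWhile, ih (k + 1)]
      ring_nf
    · simp [skipB, h, List.takeWhile, List.dropWhile]

-- flushing at a non-matching boundary: carrying cur into best
theorem specGo_flush (vl : List Char) (l : List Char) (best cur : Nat)
    (h : l = [] ∨ ∃ c rest, l = c :: rest ∧ ¬([c] = vl)) :
    specGo vl best cur l = specGo vl (max best cur) 0 l := by
  rcases h with h | ⟨c, rest, rfl, hc⟩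
  · subst h; simp [specGo]
  · simp [specGo, hc]

theorem dropWhile_head_not (vl : List Char) (l : List Char) :
    (l.dropWhile (fun c => decide ([c] = vl))) = [] ∨
      ∃ c rest, (l.dropWhile (fun c => decide ([c] = vl))) = c :: rest ∧ ¬([c] = vl) := by
  induction l with
  | nil => left; simp
  | cons c rest ih =>
    by_cases h : [c] = vl
    · simpa [List.dropWhile, h] using ih
    · right; exact ⟨c, rest, by simp [List.dropWhile, h], h⟩

theorem int_if_max (r k : Nat) :
    (if (k : Int) > (r : Int) then (k : Int) else (r : Int)) = ((max r k : Nat) : Int) := by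
  split_ifs with h <;> push_cast <;> omega

theorem loopB_eq_specGo (vl : List Char) (l : List Char) (b : Nat) :
    loopB vl (b : Int) l = ((specGo vl b 0 l : Nat) : Int) := by
  induction hn : l.length using Nat.strong_induction_on generalizing l b with
  | _ n ih =>
    cases l with
    | nil => simp [loopB, specGo]
    | cons c rest =>
      by_cases h : [c] = vl
      · rw [loopB]
        simp only [h, skipB_eq]
        have hlen := List.length_dropWhile_le (fun c => decide ([c] = vl)) rest
        have key := ih (rest.dropWhile (fun c => decide ([c] = vl))).length
          (by subst hn; simp; omega) _ (max b (1 + (rest.takeWhile (fun c => decide ([c] = vl))).length)) rfl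
        rw [int_if_max, key]
        have : specGo vl b 0 (c :: rest)
            = specGo vl (max b (1 + (rest.takeWhile (fun c => decide ([c] = vl))).length)) 0
                (rest.dropWhile (fun c => decide ([c] = vl))) := by
          rw [show specGo vl b 0 (c :: rest) = specGo vl b 1 rest by simp [specGo, h]]
          rw [specGo_takeDrop vl rest b 1]
          exact specGo_flush vl _ b _ (dropWhile_head_not vl rest)
        rw [this]
        simp
      · rw [loopB]
        simp only [h]
        rw [show specGo vl b 0 (c :: rest) = specGo vl (max b 0) 0 rest by simp [specGo, h]]
        simp only [Nat.max_zero]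
        exact ih rest.length (by subst hn; simp) rest b rfl

theorem foldA_eq_specGo (vl : List Char) (l : List Char) (r : Nat) (seg : List Char)
    (hseg : ∀ x ∈ seg, [x] = vl) :
    finishA (l.foldl (stepA vl) ((r : Int), seg)) = ((specGo vl r seg.length l : Nat) : Int) := by
  induction l generalizing r seg with
  | nil =>
    cases seg with
    | nil => simp [finishA, specGo]
    | cons a t =>
      simp only [List.foldl_nil, finishA, specGo]
      have : (if ((a :: t).length : Int) > (r : Int) then ((a :: t).length : Int) else (r : Int))
          = ((max r (a :: t).length : Nat) : Int) := int_if_max r _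
      split_ifs with hc <;> simp_all
  | cons letter l ih =>
    simp only [List.foldl_cons]
    by_cases hp : [letter] = vl
    · have hcond : ((seg.isEmpty || decide ([seg.getLastD 'a'] = vl)) && decide ([letter] = vl)) = true := by
        cases seg with
        | nil => simp [hp]
        | cons a t =>
          have hne : a :: t ≠ ([] : List Char) := by simp
          have hlast : [(a :: t).getLast?.getD 'a'] = vl := by
            rw [List.getLast?_eq_getLast_of_ne_nil hne, Option.getD_some]
            exact hseg _ (List.getLast_mem hne)
          simp [hp, hlast]
      have hstep : stepA vl ((r : Int), seg) letter = ((r : Int), seg ++ [letter]) := by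
        simp only [stepA]
        rw [hcond]
        simp
      rw [hstep]
      have hinv : ∀ x ∈ seg ++ [letter], [x] = vl := by
        intro x hx
        rcases List.mem_append.1 hx with h | h
        · exact hseg _ h
        · rw [List.mem_singleton] at h; subst h; exact hp
      rw [ih r (seg ++ [letter]) hinv]
      have : specGo vl r seg.length (letter :: l) = specGo vl r (seg.length + 1) l := by
        simp [specGo, hp]
      rw [this]
      simp
    · have hstep : stepA vl ((r : Int), seg) letter
          = ((if (seg.length : Int) > (r : Int) then (seg.length : Int) else (r : Int)), []) := by
        simp [stepA, hp]
      rw [hstep, int_if_max]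
      rw [ih (max r seg.length) [] (by simp)]
      have : specGo vl r seg.length (letter :: l) = specGo vl (max r seg.length) 0 l := by
        simp [specGo, hp]
      simp only [List.length_nil]
      rw [this]

theorem getSizeOfSegment_spec' (s value : String) :
    getSizeOfSegment s value = getSizeOfSegment_alt s value := by
  unfold getSizeOfSegment getSizeOfSegment_alt
  have hA := foldA_eq_specGo value.toList s.toList 0 [] (by simp)
  have hB := loopB_eq_specGo value.toList s.toList 0
  simp only [List.length_nil] at hA
  rw [show ((0 : Nat) : Int) = (0 : Int) from rfl] at hA hB
  rw [hA, hB]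

-- ===== VERDICT (by name: the statement is the Claim_ definition above) =====
theorem getSizeOfSegment_spec : Claim_equal_getSizeOfSegment := by
  intro s value _
  exact getSizeOfSegment_spec' s value
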